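-- pv_equiv track=rewrite | github.com/obriencj/koji-smoky-dingo | kojismokydingo/common.py | escapable_replace
-- ===== SOURCE A (Python) =====
-- def escapable_replace(orig, character, replacement):
--     """
--     Single-character string substitutions. Doubled sentinel characters
--     can be used to represent that exact character.
--
--     Examples:
--
--      * ``escapable_replace('Hello %', '%', 'World')`` returns ``"Hello
--        World"``
--      * ``escapable_replace('Hello %%', '%', 'World')`` returns
--        ``"Hello %"``
--
--     :param orig: Original text
--     :type orig: str
--
--     :param character: Single-character token.
--     :type character: str
--
--     :param replacement: Replacement text
--     :type replacement: str
--     """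
--
--     assert len(character) == 1, "escapable_replace requires single characters"
--
--     gather = []
--     collect = gather.append
--
--     pieces = iter(orig)
--     for p in pieces:
--         if p == character:
--             n = next(pieces, None)
--             if n is None:
--                 collect(replacement)
--             elif n == character:
--                 collect(character)
--             else:
--                 collect(replacement)
--                 collect(n)
--         else:
--             collect(p)
--
--     return "".join(gather)
-- ===== SOURCE B (Python) =====
-- def escapable_replace(orig, character, replacement):
--     """
--     Single-character substitution with doubled-char escaping, done with
--     string primitives: split on the doubled sentinel (those become literal
--     sentinels on re-join), replace lone sentinels inside each piece, and
--     join the pieces back with the sentinel character.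
--     """
--     assert len(character) == 1, "escapable_replace requires single characters"
--     return character.join(
--         p.replace(character, replacement) for p in orig.split(character + character))
-- ===== Notes on version B (the rewrite author's own statement) =====
-- stated objective: idiomatic
-- what changed: A consumes an iterator character by character with explicit lookahead; B does the whole job with three string primitives: split on the doubled sentinel, str.replace the lone sentinel in each piece, and join the pieces with the sentinel character.
import Mathlib
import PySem

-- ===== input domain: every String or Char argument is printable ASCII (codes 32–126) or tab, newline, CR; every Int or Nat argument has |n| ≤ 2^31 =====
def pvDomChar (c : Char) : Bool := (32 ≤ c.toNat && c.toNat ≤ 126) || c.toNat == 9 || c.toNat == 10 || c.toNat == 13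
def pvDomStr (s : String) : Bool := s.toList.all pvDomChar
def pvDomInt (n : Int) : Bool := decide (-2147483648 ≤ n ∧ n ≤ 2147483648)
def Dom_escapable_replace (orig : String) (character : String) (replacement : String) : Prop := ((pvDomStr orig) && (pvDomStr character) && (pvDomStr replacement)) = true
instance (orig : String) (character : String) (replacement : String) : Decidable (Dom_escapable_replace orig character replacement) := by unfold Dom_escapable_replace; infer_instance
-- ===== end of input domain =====

-- B replaces A's char-by-char iterator loop with split on the doubled sentinel / replace / join (idiomatic; same O(n) cost).

-- ===== PORT A =====
-- the for-loop over `iter(orig)` with its `next(pieces, None)` lookahead, as structural recursion;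
-- `p == character` (1-char string vs string) is rendered as the list comparison [p] = character.toList
def pvGoA (character replacement : String) : List Char → List String
  | [] => []
  | p :: rest =>
    if [p] = character.toList then
      match rest with
      | [] => [replacement]                                   -- n is None
      | n :: rest' =>
        if [n] = character.toList then
          character :: pvGoA character replacement rest'      -- collect(character)
        else
          replacement :: String.ofList [n] :: pvGoA character replacement rest'
    else
      String.ofList [p] :: pvGoA character replacement rest

def escapable_replace (orig : String) (character : String) (replacement : String) : String :=
  PySem.Str.join "" (pvGoA character replacement orig.toList)

-- ===== PORT B =====
-- Source B: character.join(p.replace(character, replacement) for p in orig.split(character + character));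
-- orig.split(sep) with sep ≠ "" is PySem.Chars.splitOn (under Pre_ the separator has length 2)
def escapable_replace_alt (orig : String) (character : String) (replacement : String) : String :=
  PySem.Str.join character
    ((PySem.Chars.splitOn orig.toList (character.toList ++ character.toList)).map
      (fun p => PySem.Str.replace (String.ofList p) character replacement))

-- ===== PRECONDITION & SPEC =====
-- A's `assert len(character) == 1` raises AssertionError otherwise; Pre_ is exactly that guard.
def Pre_escapable_replace (orig : String) (character : String) (replacement : String) : Prop :=
  character.toList.length = 1
instance (orig : String) (character : String) (replacement : String) : Decidable (Pre_escapable_replace orig character replacement) := by unfold Pre_escapable_replace; infer_instance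

def pvWitness_escapable_replace : String × String × String := ("Hello %% %x", "%", "World")

def Spec_escapable_replace (orig : String) (character : String) (replacement : String) (out : String) : Prop := out = escapable_replace_alt orig character replacement
instance (orig : String) (character : String) (replacement : String) (out : String) : Decidable (Spec_escapable_replace orig character replacement out) := by unfold Spec_escapable_replace; infer_instance

-- ===== CLAIM (what is proved, stated in full; the proofs are below) =====
def Claim_equal_escapable_replace : Prop := ∀ (orig : String) (character : String) (replacement : String), Dom_escapable_replace orig character replacement → Pre_escapable_replace orig character replacement → Spec_escapable_replace orig character replacement (escapable_replace orig character replacement)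

-- ===== LEMMAS AND PROOFS =====

-- recursive characterisation of str.replace with a single-character pattern
def pvRep (c : Char) (r : List Char) : List Char → List Char
  | [] => []
  | x :: t => if x = c then r ++ pvRep c r t else x :: pvRep c r t

-- apply a function to the first chunk only
def pvModHead (f : List Char → List Char) : List (List Char) → List (List Char)
  | [] => []
  | h :: tl => f h :: tl

-- recursive characterisation of split on the doubled character [c, c]
def pvSp (c : Char) : List Char → List (List Char)
  | [] => [[]]
  | [x] => [[x]]
  | x :: y :: t =>
    if x = c ∧ y = c then [] :: pvSp c t
    else pvModHead (x :: ·) (pvSp c (y :: t))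

-- shape equations for pvGoA (its nested match hides the equations from simp)
theorem pvGoA_nil (ch r : String) : pvGoA ch r [] = [] := by
  rw [pvGoA.eq_def]

theorem pvGoA_ne (ch r : String) (p : Char) (rest : List Char) (h : ¬ ([p] = ch.toList)) :
    pvGoA ch r (p :: rest) = String.ofList [p] :: pvGoA ch r rest := by
  rw [pvGoA.eq_def]; simp [h]

theorem pvGoA_last (ch r : String) (p : Char) (h : [p] = ch.toList) :
    pvGoA ch r [p] = [r] := by
  rw [pvGoA.eq_def]; simp [h]

theorem pvGoA_cc (ch r : String) (p q : Char) (rest : List Char)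
    (hp : [p] = ch.toList) (hq : [q] = ch.toList) :
    pvGoA ch r (p :: q :: rest) = ch :: pvGoA ch r rest := by
  rw [pvGoA.eq_def]; simp [hp, hq]

theorem pvGoA_cn (ch r : String) (p q : Char) (rest : List Char)
    (hp : [p] = ch.toList) (hq : ¬ ([q] = ch.toList)) :
    pvGoA ch r (p :: q :: rest) = r :: String.ofList [q] :: pvGoA ch r rest := by
  rw [pvGoA.eq_def]; simp [hp, hq]

theorem pvRep_go (c : Char) (r : List Char) :
    ∀ (fuel : Nat) (l acc : List Char), l.length ≤ fuel →
      PySem.Chars.replace.go [c] r fuel l acc = acc.reverse ++ pvRep c r l := by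
  intro fuel
  induction fuel with
  | zero =>
    intro l acc h
    have hl : l = [] := by cases l <;> simp_all
    subst hl
    rw [PySem.Chars.replace.go]; simp [pvRep]
  | succ n ih =>
    intro l acc h
    cases l with
    | nil =>
      rw [PySem.Chars.replace.go]
      all_goals simp [pvRep]
    | cons x t =>
      rw [PySem.Chars.replace.go]
      by_cases hx : x = c
      · subst hx
        rw [show ([x].isPrefixOf (x :: t)) = true by simp [List.isPrefixOf]]
        simp only [if_true, List.length_cons, List.drop_succ_cons, List.length_nil,
          List.drop_zero]
        rw [ih t (r.reverse ++ acc) (by simp at h; omega)]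
        simp [pvRep]
      · rw [show ([c].isPrefixOf (x :: t)) = false by
          simp [List.isPrefixOf]; exact fun hh => hx hh.symm]
        simp only [Bool.false_eq_true, if_false]
        rw [ih t (x :: acc) (by simp at h; omega)]
        simp [pvRep, hx]

theorem pvReplace_eq (c : Char) (r l : List Char) :
    PySem.Chars.replace l [c] r = pvRep c r l := by
  simp [PySem.Chars.replace, pvRep_go c r l.length l [] le_rfl]

theorem pvSp_ne_nil (c : Char) (l : List Char) : pvSp c l ≠ [] := by
  induction l using pvSp.induct c with
  | case1 => simp [pvSp]
  | case2 => simp [pvSp]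
  | case3 x y t hc ih => simp [pvSp, hc]
  | case4 x y t hc ih =>
    simp only [pvSp, if_neg hc]
    cases hs : pvSp c (y :: t) with
    | nil => exact absurd hs ih
    | cons a b => simp [pvModHead]

theorem pvSplit_go (c : Char) :
    ∀ (fuel : Nat) (l cur : List Char) (acc : List (List Char)), l.length < fuel →
      PySem.Chars.splitOn.go [c, c] fuel l cur acc
        = acc.reverse ++ pvModHead (cur.reverse ++ ·) (pvSp c l) := by
  intro fuel
  induction fuel with
  | zero => intro l cur acc h; omega
  | succ n ih =>
    intro l cur acc h
    cases l with
    | nil =>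
      rw [PySem.Chars.splitOn.go]
      all_goals simp [pvSp, pvModHead]
    | cons x t =>
      rw [PySem.Chars.splitOn.go]
      cases t with
      | nil =>
        rw [show ([c, c].isPrefixOf [x]) = false by simp [List.isPrefixOf]]
        simp only [Bool.false_eq_true, if_false]
        rw [ih [] (x :: cur) acc (by simp only [List.length_nil, List.length_cons] at h ⊢; omega)]
        simp [pvSp, pvModHead]
      | cons y t' =>
        by_cases hcc : x = c ∧ y = c
        · obtain ⟨hx, hy⟩ := hcc
          rw [show ([c, c].isPrefixOf (x :: y :: t')) = true by simp [List.isPrefixOf, hx, hy]]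
          simp only [if_true, List.length_cons, List.drop_succ_cons, List.length_nil,
            List.drop_zero]
          rw [ih t' [] (cur.reverse :: acc) (by simp at h; omega)]
          have hsp2 : pvSp c (x :: y :: t') = [] :: pvSp c t' := by simp [pvSp, hx, hy]
          rw [hsp2]
          cases hs : pvSp c t' with
          | nil => exact absurd hs (pvSp_ne_nil c t')
          | cons a b => simp [pvModHead]
        · rw [show ([c, c].isPrefixOf (x :: y :: t')) = false by
            simp [List.isPrefixOf]
            intro h1 h2; exact hcc ⟨h1.symm, h2.symm⟩]
          simp only [Bool.false_eq_true, if_false]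
          rw [ih (y :: t') (x :: cur) acc (by simp at h ⊢; omega)]
          simp only [pvSp, if_neg hcc]
          cases hs : pvSp c (y :: t') with
          | nil => exact absurd hs (pvSp_ne_nil c (y :: t'))
          | cons a b => simp [pvModHead]

theorem pvSplitOn_eq (c : Char) (l : List Char) :
    PySem.Chars.splitOn l [c, c] = pvSp c l := by
  unfold PySem.Chars.splitOn
  rw [pvSplit_go c (l.length + 1) l [] [] (by omega)]
  cases hs : pvSp c l with
  | nil => exact absurd hs (pvSp_ne_nil c l)
  | cons a b => simp [pvModHead]

theorem pvJoin_cons_append (sep a b : List Char) (rest : List (List Char)) :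
    PySem.Chars.join sep ((a ++ b) :: rest) = a ++ PySem.Chars.join sep (b :: rest) := by
  cases rest with
  | nil => simp [PySem.Chars.join_singleton]
  | cons q r => simp [PySem.Chars.join_cons_cons, List.append_assoc]

theorem pvJoin_nil_flatten (parts : List (List Char)) :
    PySem.Chars.join [] parts = parts.flatten := by
  induction parts with
  | nil => simp [PySem.Chars.join_nil]
  | cons p rest ih =>
    cases rest with
    | nil => simp [PySem.Chars.join_singleton]
    | cons q r => simp [PySem.Chars.join_cons_cons, ih]

theorem pvMain (c : Char) (character replacement : String) (hch : character.toList = [c]) :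
    ∀ l : List Char,
      ((pvGoA character replacement l).map String.toList).flatten
        = PySem.Chars.join [c] ((pvSp c l).map (pvRep c replacement.toList)) := by
  intro l
  induction l using pvSp.induct c with
  | case1 =>
    rw [pvGoA_nil]
    simp [pvSp, pvRep, PySem.Chars.join_singleton]
  | case2 x =>
    by_cases hx : x = c
    · have hxl : [x] = character.toList := by rw [hch, hx]
      rw [pvGoA_last _ _ _ hxl]
      simp [pvSp, pvRep, hx, PySem.Chars.join_singleton]
    · have hxl : ¬ ([x] = character.toList) := by rw [hch]; simp [hx]
      rw [pvGoA_ne _ _ _ _ hxl, pvGoA_nil]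
      simp [pvSp, pvRep, hx, PySem.Chars.join_singleton]
  | case3 x y t hc ih =>
    obtain ⟨hx, hy⟩ := hc
    have hxl : [x] = character.toList := by rw [hch, hx]
    have hyl : [y] = character.toList := by rw [hch, hy]
    have hsp : pvSp c (x :: y :: t) = [] :: pvSp c t := by simp [pvSp, hx, hy]
    rw [pvGoA_cc _ _ _ _ _ hxl hyl, hsp]
    cases hs : (pvSp c t).map (pvRep c replacement.toList) with
    | nil => exact absurd (List.map_eq_nil_iff.mp hs) (pvSp_ne_nil c t)
    | cons a b =>
      rw [hs] at ih
      simp only [List.map_cons, List.flatten_cons, hs, PySem.Chars.join_cons_cons, hch, ih]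
      simp [pvRep]
  | case4 x y t hc ih =>
    have hsp : pvSp c (x :: y :: t) = pvModHead (x :: ·) (pvSp c (y :: t)) := by
      simp [pvSp, hc]
    by_cases hx : x = c
    · have hy : ¬ (y = c) := fun hy => hc ⟨hx, hy⟩
      have hxl : [x] = character.toList := by rw [hch, hx]
      have hyl : ¬ ([y] = character.toList) := by rw [hch]; simp [hy]
      rw [pvGoA_cn _ _ _ _ _ hxl hyl, hsp]
      cases hs : pvSp c (y :: t) with
      | nil => exact absurd hs (pvSp_ne_nil c (y :: t))
      | cons a b =>
        simp only [pvModHead, List.map_cons]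
        have hrep : pvRep c replacement.toList (x :: a)
            = replacement.toList ++ pvRep c replacement.toList a := by
          simp [pvRep, hx]
        rw [hrep, pvJoin_cons_append]
        rw [hs, List.map_cons] at ih
        rw [← ih, pvGoA_ne _ _ _ _ hyl]
        simp
    · have hxl : ¬ ([x] = character.toList) := by rw [hch]; simp [hx]
      rw [pvGoA_ne _ _ _ _ hxl, hsp]
      cases hs : pvSp c (y :: t) with
      | nil => exact absurd hs (pvSp_ne_nil c (y :: t))
      | cons a b =>
        simp only [pvModHead, List.map_cons]
        have hrep : pvRep c replacement.toList (x :: a)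
            = [x] ++ pvRep c replacement.toList a := by
          simp [pvRep, hx]
        rw [hrep, pvJoin_cons_append]
        rw [hs, List.map_cons] at ih
        rw [← ih]
        simp

-- ===== VERDICT (by name: the statement is the Claim_ definition above) =====
theorem escapable_replace_spec : Claim_equal_escapable_replace := by
  intro orig character replacement _ hpre
  unfold Spec_escapable_replace
  obtain ⟨c, hch⟩ : ∃ c, character.toList = [c] := by
    cases h : character.toList with
    | nil => simp [Pre_escapable_replace, h] at hpre
    | cons a t => cases t with
      | nil => exact ⟨a, rfl⟩
      | cons b t' => simp [Pre_escapable_replace, h] at hpre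
  rw [← String.toList_inj]
  rw [escapable_replace, escapable_replace_alt, PySem.Str.toList_join, PySem.Str.toList_join]
  rw [show ("" : String).toList = [] from rfl]
  simp only [List.map_map, Function.comp_def, PySem.Str.toList_replace, String.toList_ofList, hch]
  rw [pvJoin_nil_flatten]
  rw [show [c] ++ [c] = [c, c] from rfl, pvSplitOn_eq]
  simp only [pvReplace_eq]
  exact pvMain c character replacement hch orig.toList
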